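-- pv_equiv track=rewrite | github.com/nccurry/papercrown | src/papercrown/fillers.py | _named_filler_context
-- ===== SOURCE A (Python) =====
-- def _named_filler_context(stem: str) -> str | None:
--     for prefix in (
--         "filler-spot-",
--         "filler-wide-",
--         "filler-bottom-",
--         "filler-page-",
--     ):
--         if stem.startswith(prefix):
--             remainder = stem.removeprefix(prefix)
--             return remainder.split("-", 1)[0] if remainder else None
--     return None
-- ===== SOURCE B (Python) =====
-- def _named_filler_context(stem: str) -> str | None:
--     if not stem.startswith("filler-"):
--         return None
--     category, _, remainder = stem[len("filler-"):].partition("-")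
--     if category not in {"spot", "wide", "bottom", "page"}:
--         return None
--     return remainder.partition("-")[0] if remainder else None
-- ===== Notes on version B (the rewrite author's own statement) =====
-- stated objective: idiomatic
-- what changed: B parses the stem's structure once (strip 'filler-', partition the rest at the first dash, test the category against a set) instead of A's loop trying four full prefixes with startswith/removeprefix.
import Mathlib
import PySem

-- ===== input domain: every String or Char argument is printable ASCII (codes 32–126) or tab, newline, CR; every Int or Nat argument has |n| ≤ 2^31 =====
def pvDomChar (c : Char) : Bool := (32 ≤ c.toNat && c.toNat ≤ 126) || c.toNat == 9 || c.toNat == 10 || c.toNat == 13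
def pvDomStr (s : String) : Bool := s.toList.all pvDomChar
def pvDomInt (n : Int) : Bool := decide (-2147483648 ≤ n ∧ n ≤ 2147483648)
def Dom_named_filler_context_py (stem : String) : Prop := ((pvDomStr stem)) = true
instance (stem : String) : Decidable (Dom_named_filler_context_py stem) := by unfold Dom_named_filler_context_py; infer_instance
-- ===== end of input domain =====

-- B parses the stem once (strip "filler-", partition at the first dash, set lookup) instead of A's
-- loop over four full prefixes; same return value everywhere (objective: idiomatic).

-- ===== PORT A =====
-- exact port of str.removeprefix
def pvRemoveprefix (l p : List Char) : List Char :=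
  if PySem.Chars.startswith l p then l.drop p.length else l

-- exact port of s.split("-", 1) for the fixed separator "-" and maxsplit 1
def pvSplitDash1 : List Char → List (List Char)
  | [] => [[]]
  | c :: t =>
    if c = '-' then [[], t]
    else
      match pvSplitDash1 t with
      | h :: r => (c :: h) :: r
      | [] => [[c]]

-- A's for-loop over the four prefixes
def pvALoop (l : List Char) : List (List Char) → Option String
  | [] => none
  | p :: ps =>
    if PySem.Chars.startswith l p then
      let remainder := pvRemoveprefix l p
      if remainder ≠ [] then some (String.ofList ((pvSplitDash1 remainder).headD [])) else none
    else pvALoop l ps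

def named_filler_context_py (stem : String) : Option String :=
  pvALoop stem.toList
    ["filler-spot-".toList, "filler-wide-".toList, "filler-bottom-".toList, "filler-page-".toList]

-- ===== PORT B =====
-- exact port of str.partition("-"): (part before the first '-', part after it);
-- the middle component of Python's triple is unused in Source B and omitted
def pvPartitionDash : List Char → List Char × List Char
  | [] => ([], [])
  | c :: t =>
    if c = '-' then ([], t)
    else
      let p := pvPartitionDash t
      (c :: p.1, p.2)

def named_filler_context_py_alt (stem : String) : Option String :=
  let l := stem.toList
  if PySem.Chars.startswith l "filler-".toList then
    let p := pvPartitionDash (l.drop 7)   -- 7 = len("filler-")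
    if p.1 ∈ (["spot".toList, "wide".toList, "bottom".toList, "page".toList] : List (List Char)) then
      if p.2 ≠ [] then some (String.ofList (pvPartitionDash p.2).1) else none
    else none
  else none

-- ===== PRECONDITION & SPEC =====
def Spec_named_filler_context_py (stem : String) (out : Option String) : Prop := out = named_filler_context_py_alt stem
instance (stem : String) (out : Option String) : Decidable (Spec_named_filler_context_py stem out) := by unfold Spec_named_filler_context_py; infer_instance

-- ===== CLAIM (what is proved, stated in full; the proofs are below) =====
def Claim_equal_named_filler_context_py : Prop := ∀ (stem : String), Dom_named_filler_context_py stem → Spec_named_filler_context_py stem (named_filler_context_py stem)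

-- ===== LEMMAS AND PROOFS =====

theorem pvPartitionDash_eq (l : List Char) :
    pvPartitionDash l = (l.takeWhile (· ≠ '-'), (l.dropWhile (· ≠ '-')).drop 1) := by
  induction l with
  | nil => rfl
  | cons c t ih =>
    by_cases hc : c = '-' <;> simp [pvPartitionDash, hc, ih]

theorem pvSplitDash1_head (l : List Char) :
    (pvSplitDash1 l).headD [] = l.takeWhile (· ≠ '-') := by
  induction l with
  | nil => rfl
  | cons c t ih =>
    by_cases hc : c = '-'
    · simp [pvSplitDash1, hc]
    · cases h : pvSplitDash1 t with
      | nil =>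
        rw [h] at ih; simp at ih
        simpa [pvSplitDash1, hc, h] using ih
      | cons x r =>
        rw [h] at ih; simp at ih
        simp [pvSplitDash1, hc, h, ih]

theorem pvPrefix_append_iff (p q l : List Char) :
    (p ++ q) <+: l ↔ p <+: l ∧ q <+: l.drop p.length := by
  constructor
  · rintro ⟨r, rfl⟩
    refine ⟨⟨q ++ r, by simp⟩, ⟨r, ?_⟩⟩
    rw [List.append_assoc, List.drop_left]
  · rintro ⟨⟨t, rfl⟩, hq⟩
    rw [List.drop_left] at hq
    obtain ⟨r, rfl⟩ := hq
    exact ⟨r, by simp⟩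

theorem pvStartswith_cat (c : List Char) (hc : '-' ∉ c) (rest : List Char) :
    (c ++ ['-']) <+: rest ↔
      (rest.takeWhile (· ≠ '-') = c ∧ rest.dropWhile (· ≠ '-') ≠ []) := by
  induction c generalizing rest with
  | nil =>
    cases rest with
    | nil => simp
    | cons ch t =>
      by_cases h : ch = '-'
      · subst h; simp [List.cons_prefix_cons]
      · have h' : ¬('-' = ch) := fun e => h e.symm
        simp [List.cons_prefix_cons, h, h']
  | cons a c' ih =>
    have ha : a ≠ '-' := fun h => hc (by simp [h])
    have hc' : '-' ∉ c' := fun h => hc (by simp [h])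
    cases rest with
    | nil => simp [ha]
    | cons ch t =>
      by_cases h : ch = a
      · subst h
        simp [List.cons_prefix_cons, ha, ih hc' t]
      · have h' : ¬(a = ch) := fun e => h e.symm
        by_cases hd : ch = '-'
        · subst hd
          simp [List.cons_prefix_cons, h', ha]
        · simp [List.cons_prefix_cons, h, h', hd]

theorem pvDrop_eq (c rest : List Char) (hc : '-' ∉ c) (h : (c ++ ['-']) <+: rest) :
    rest.drop (c.length + 1) = (rest.dropWhile (· ≠ '-')).drop 1 := by
  obtain ⟨r, rfl⟩ := h
  have hnil : (c.dropWhile (· ≠ '-')) = [] := by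
    rw [List.dropWhile_eq_nil_iff]
    intro x hx; simp; rintro rfl; exact hc hx
  have : ((c ++ ['-']) ++ r).dropWhile (· ≠ '-') = '-' :: r := by
    rw [List.append_assoc, List.dropWhile_append, hnil]
    simp
  rw [this]
  have : c.length + 1 = (c ++ ['-']).length := by simp
  rw [this, List.drop_left]
  simp

theorem pvMain (rest : List Char) :
    pvALoop ("filler-".toList ++ rest)
      ["filler-spot-".toList, "filler-wide-".toList, "filler-bottom-".toList, "filler-page-".toList]
    = (let p := pvPartitionDash rest;
       if p.1 ∈ (["spot".toList, "wide".toList, "bottom".toList, "page".toList] : List (List Char)) then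
         if p.2 ≠ [] then some (String.ofList (pvPartitionDash p.2).1) else none
       else none) := by
  have hsw : ∀ c : List Char, '-' ∉ c →
      (PySem.Chars.startswith ("filler-".toList ++ rest) ("filler-".toList ++ (c ++ ['-'])) = true
        ↔ (rest.takeWhile (· ≠ '-') = c ∧ rest.dropWhile (· ≠ '-') ≠ [])) := by
    intro c hc
    rw [PySem.Chars.startswith_iff, pvPrefix_append_iff, List.drop_left]
    simp [pvStartswith_cat c hc rest]
  have h1 := hsw "spot".toList (by decide)
  have h2 := hsw "wide".toList (by decide)
  have h3 := hsw "bottom".toList (by decide)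
  have h4 := hsw "page".toList (by decide)
  simp at h1 h2 h3 h4
  by_cases hdm : '-' ∈ rest
  case neg =>
    have hdw : List.dropWhile (fun x => !decide (x = '-')) rest = [] := by
      rw [List.dropWhile_eq_nil_iff]
      intro x hx
      simp
      rintro rfl
      exact hdm hx
    simp [pvALoop, pvPartitionDash_eq, hdw, hdm, h1, h2, h3, h4]
  case pos =>
    have hdw : List.dropWhile (fun x => !decide (x = '-')) rest ≠ [] := by
      intro h
      have := (List.dropWhile_eq_nil_iff.mp h) '-' hdm
      simp at this
    have hdrop : ∀ c : List Char, '-' ∉ c → List.takeWhile (fun x => !decide (x = '-')) rest = c →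
        List.drop (c.length + 1) rest = List.drop 1 (List.dropWhile (fun x => !decide (x = '-')) rest) := by
      intro c hc htw
      have h' := pvDrop_eq c rest hc ((pvStartswith_cat c hc rest).mpr ⟨by simpa using htw, by simpa using hdw⟩)
      simpa using h'
    by_cases t1 : List.takeWhile (fun x => !decide (x = '-')) rest = "spot".toList
    case pos =>
      have hd : List.drop 5 rest = (List.dropWhile (fun x => !decide (x = '-')) rest).tail := by
        simpa [List.drop_one] using hdrop "spot".toList (by decide) t1
      have hsd := pvSplitDash1_head (List.drop 5 rest)
      simp at hsd
      simp [pvALoop, pvRemoveprefix, h1, hdm, t1, pvPartitionDash_eq]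
      rw [← hd]
      by_cases hlen : 5 < rest.length
      · have h5 : ¬ List.drop 5 rest = [] := by simp [List.drop_eq_nil_iff]; omega
        simp [hlen, h5, hsd]
      · have h5 : List.drop 5 rest = [] := by simp [List.drop_eq_nil_iff]; omega
        simp [hlen, h5]
    case neg =>
    by_cases t2 : List.takeWhile (fun x => !decide (x = '-')) rest = "wide".toList
    case pos =>
      have hd : List.drop 5 rest = (List.dropWhile (fun x => !decide (x = '-')) rest).tail := by
        simpa [List.drop_one] using hdrop "wide".toList (by decide) t2
      have hsd := pvSplitDash1_head (List.drop 5 rest)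
      simp at hsd
      simp [pvALoop, pvRemoveprefix, h1, h2, hdm, t2, pvPartitionDash_eq]
      rw [← hd]
      by_cases hlen : 5 < rest.length
      · have h5 : ¬ List.drop 5 rest = [] := by simp [List.drop_eq_nil_iff]; omega
        simp [hlen, h5, hsd]
      · have h5 : List.drop 5 rest = [] := by simp [List.drop_eq_nil_iff]; omega
        simp [hlen, h5]
    case neg =>
    by_cases t3 : List.takeWhile (fun x => !decide (x = '-')) rest = "bottom".toList
    case pos =>
      have hd : List.drop 7 rest = (List.dropWhile (fun x => !decide (x = '-')) rest).tail := by
        simpa [List.drop_one] using hdrop "bottom".toList (by decide) t3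
      have hsd := pvSplitDash1_head (List.drop 7 rest)
      simp at hsd
      simp [pvALoop, pvRemoveprefix, h1, h2, h3, hdm, t3, pvPartitionDash_eq]
      rw [← hd]
      by_cases hlen : 7 < rest.length
      · have h5 : ¬ List.drop 7 rest = [] := by simp [List.drop_eq_nil_iff]; omega
        simp [hlen, h5, hsd]
      · have h5 : List.drop 7 rest = [] := by simp [List.drop_eq_nil_iff]; omega
        simp [hlen, h5]
    case neg =>
    by_cases t4 : List.takeWhile (fun x => !decide (x = '-')) rest = "page".toList
    case pos =>
      have hd : List.drop 5 rest = (List.dropWhile (fun x => !decide (x = '-')) rest).tail := by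
        simpa [List.drop_one] using hdrop "page".toList (by decide) t4
      have hsd := pvSplitDash1_head (List.drop 5 rest)
      simp at hsd
      simp [pvALoop, pvRemoveprefix, h1, h2, h3, h4, hdm, t4, pvPartitionDash_eq]
      rw [← hd]
      by_cases hlen : 5 < rest.length
      · have h5 : ¬ List.drop 5 rest = [] := by simp [List.drop_eq_nil_iff]; omega
        simp [hlen, h5, hsd]
      · have h5 : List.drop 5 rest = [] := by simp [List.drop_eq_nil_iff]; omega
        simp [hlen, h5]
    case neg =>
      simp at t1 t2 t3 t4
      simp [pvALoop, h1, h2, h3, h4, t1, t2, t3, t4, pvPartitionDash_eq]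

theorem pvPorts_eq (stem : String) :
    named_filler_context_py stem = named_filler_context_py_alt stem := by
  unfold named_filler_context_py named_filler_context_py_alt
  by_cases hF : PySem.Chars.startswith stem.toList "filler-".toList = true
  · obtain ⟨rest, hl⟩ := (PySem.Chars.startswith_iff _ _).mp hF
    rw [if_pos hF, ← hl]
    have h7 : ("filler-".toList ++ rest).drop 7 = rest := by
      have h : ("filler-".toList : List Char).length = 7 := by decide
      rw [← h, List.drop_left]
    rw [h7]
    exact pvMain rest
  · -- no "filler-" prefix: every loop test of A fails too
    have hnot : ∀ p : List Char, "filler-".toList <+: p →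
        PySem.Chars.startswith stem.toList p = false := by
      intro p hp
      rw [Bool.eq_false_iff]
      intro hsw
      exact hF ((PySem.Chars.startswith_iff _ _).mpr
        (hp.trans ((PySem.Chars.startswith_iff _ _).mp hsw)))
    have n1 := hnot "filler-spot-".toList (by decide)
    have n2 := hnot "filler-wide-".toList (by decide)
    have n3 := hnot "filler-bottom-".toList (by decide)
    have n4 := hnot "filler-page-".toList (by decide)
    simp at hF n1 n2 n3 n4
    simp [pvALoop, hF, n1, n2, n3, n4]

-- ===== VERDICT (by name: the statement is the Claim_ definition above) =====
theorem named_filler_context_py_spec : Claim_equal_named_filler_context_py := by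
  intro stem _
  exact pvPorts_eq stem
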